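-- pv_equiv track=rewrite | github.com/MKaivola/EventTech | data/preprocess_utils.py | answer_to_category_dict
-- ===== SOURCE A (Python) =====
-- def answer_to_category_dict(
--     answer_set: set[str], categories: dict[str, str]
-- ) -> dict[str, str]:
--     """
--     Map answers to given categories based on substring matching
--
--     Arguments
--     ---------
--     answer_set
--         A set of answers to Telegram polls
--     categories
--         A dictionary of substrings to categories to map to
--     """
--
--     answer_cat_dict = {}
--
--     substrings = list(categories.keys())
--
--     for answer in answer_set:
--         answer_clean = answer.lower().strip()
--         substr_index = next(
--             (i for i, v in enumerate(substrings) if v in answer_clean), None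
--         )
--
--         match substr_index is None:
--             case True:
--                 answer_cat_dict[answer] = None
--             case False:
--                 answer_cat_dict[answer] = categories[substrings[substr_index]]
--
--     return answer_cat_dict
-- ===== SOURCE B (Python) =====
-- def answer_to_category_dict(answer_set, categories):
--     # Transposed strategy: initialise every answer to None, then sweep the
--     # patterns from lowest to highest priority (reversed insertion order),
--     # overwriting matches so the highest-priority (earliest) pattern wins.
--     result = {answer: None for answer in answer_set}
--     cleaned = [(answer, answer.lower().strip()) for answer in answer_set]
--     for substring, category in reversed(list(categories.items())):
--         for answer, answer_clean in cleaned: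
--             if substring in answer_clean:
--                 result[answer] = category
--     return result
-- ===== Notes on version B (the rewrite author's own statement) =====
-- stated objective: alternative
-- what changed: A scans the pattern list per answer and stops at the first match (enumerate + next + dict lookup); B transposes the loops: it initialises every answer to None, then sweeps the patterns in reversed dict order over pre-cleaned answers, overwriting matches so the earliest (highest-priority) pattern wins.
import Mathlib
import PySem

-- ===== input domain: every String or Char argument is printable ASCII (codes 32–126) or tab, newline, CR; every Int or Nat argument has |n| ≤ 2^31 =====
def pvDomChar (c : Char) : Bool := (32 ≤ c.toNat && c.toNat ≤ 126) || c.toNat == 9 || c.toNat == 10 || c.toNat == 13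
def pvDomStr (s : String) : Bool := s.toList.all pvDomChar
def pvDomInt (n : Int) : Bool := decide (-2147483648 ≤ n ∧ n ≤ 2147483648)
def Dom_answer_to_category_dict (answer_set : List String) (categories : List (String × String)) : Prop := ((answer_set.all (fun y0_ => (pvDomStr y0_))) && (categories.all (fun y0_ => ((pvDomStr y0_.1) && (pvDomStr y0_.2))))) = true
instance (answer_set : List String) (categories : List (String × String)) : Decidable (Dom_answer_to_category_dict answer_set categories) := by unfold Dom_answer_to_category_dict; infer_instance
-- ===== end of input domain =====

-- B replaces A's per-answer linear scan of the patterns by a transposed sweep: every answer starts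
-- at None and the patterns are applied lowest-priority-first (reversed dict order), overwriting
-- matches so the earliest pattern wins — a different traversal, not faster (objective: alternative).

-- ===== PORT A =====
-- answer.lower().strip() (shared by the two Pythons verbatim)
def pvClean (a : String) : String := PySem.Str.strip (PySem.Str.lower a)

def answer_to_category_dict (answer_set : List String) (categories : List (String × String)) : List (String × Option String) :=
  let cats : PySem.Dict String String := PySem.Dict.mk categories
  let substrings := cats.keys
  (answer_set.foldl (fun d answer =>
      let answer_clean := pvClean answer
      d.insert answer
        (match substrings.findIdx? (fun v => PySem.Str.isIn v answer_clean) with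
         | none => (none : Option String)
         | some i => cats.get? (substrings.getD i "")))   -- categories[substrings[i]]: the key is in cats, so get? is always `some`
    PySem.Dict.empty).items

-- ===== PORT B =====
def answer_to_category_dict_alt (answer_set : List String) (categories : List (String × String)) : List (String × Option String) :=
  let result0 : PySem.Dict String (Option String) :=
    answer_set.foldl (fun d answer => d.insert answer none) PySem.Dict.empty
  let cleaned := answer_set.map (fun answer => (answer, pvClean answer))
  (categories.reverse.foldl (fun d p =>
      cleaned.foldl (fun d q => if PySem.Str.isIn p.1 q.2 then d.insert q.1 (some p.2) else d) d)
    result0).items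

-- ===== PRECONDITION & SPEC =====
def Spec_answer_to_category_dict (answer_set : List String) (categories : List (String × String)) (out : List (String × Option String)) : Prop := out = answer_to_category_dict_alt answer_set categories
instance (answer_set : List String) (categories : List (String × String)) (out : List (String × Option String)) : Decidable (Spec_answer_to_category_dict answer_set categories out) := by unfold Spec_answer_to_category_dict; infer_instance

-- ===== CLAIM (what is proved, stated in full; the proofs are below) =====
def Claim_equal_answer_to_category_dict : Prop := ∀ (answer_set : List String) (categories : List (String × String)), Dom_answer_to_category_dict answer_set categories → Spec_answer_to_category_dict answer_set categories (answer_to_category_dict answer_set categories)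

-- ===== LEMMAS AND PROOFS =====

-- the first-matching-pattern value for a cleaned answer
def pvFVal (categories : List (String × String)) (c : String) : Option String :=
  (categories.find? (fun p => PySem.Str.isIn p.1 c)).map (·.2)

theorem pv_get?_mk (l : List (String × String)) (k : String) :
    (PySem.Dict.mk l).get? k = (l.find? (fun q => q.1 == k)).map (·.2) := by
  simp [PySem.Dict.get?]

theorem pv_getD_eq (d : PySem.Dict String (Option String)) (k : String) (dflt : Option String) :
    d.getD k dflt = (d.get? k).getD dflt := by
  simp [PySem.Dict.getD, PySem.Dict.get?]

-- A's per-answer value (enumerate-first-index + dict lookup) is the first-matching item's value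
theorem pvA_val (categories : List (String × String)) (c : String) :
    (match (categories.map Prod.fst).findIdx? (fun v => PySem.Str.isIn v c) with
     | none => (none : Option String)
     | some i => (PySem.Dict.mk categories).get? ((categories.map Prod.fst).getD i ""))
    = pvFVal categories c := by
  induction categories with
  | nil => simp [pvFVal]
  | cons p cs ih =>
    rw [List.map_cons, List.findIdx?_cons]
    by_cases hp : PySem.Str.isIn p.1 c
    · have hpc : PySem.Chars.isIn p.1.toList c.toList = true := by
        simpa [PySem.Str.isIn] using hp
      rw [if_pos (by simpa using hp)]
      show (PySem.Dict.mk (p::cs)).get? ((p.1 :: cs.map Prod.fst).getD 0 "") = pvFVal (p::cs) c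
      rw [List.getD_cons_zero, pv_get?_mk]
      simp only [pvFVal]
      rw [List.find?_cons, List.find?_cons]
      simp [hpc]
    · have hpb : PySem.Str.isIn p.1 c = false := by simpa using hp
      have hpc : PySem.Chars.isIn p.1.toList c.toList = false := by
        simpa [PySem.Str.isIn] using hpb
      rw [if_neg (by simp [hpc])]
      have hskip : List.find? (fun q => PySem.Str.isIn q.1 c) (p::cs)
                 = List.find? (fun q => PySem.Str.isIn q.1 c) cs := by
        rw [List.find?_cons]; simp [hpc]
      have htail : pvFVal (p::cs) c = pvFVal cs c := by
        simp only [pvFVal]; rw [hskip]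
      rw [htail]
      cases hfi : (cs.map Prod.fst).findIdx? (fun v => PySem.Str.isIn v c) with
      | none =>
        rw [hfi] at ih
        simpa using ih
      | some i =>
        rw [hfi] at ih
        obtain ⟨hlen, hpi, -⟩ := List.findIdx?_eq_some_iff_getElem.mp hfi
        set k := (cs.map Prod.fst).getD i "" with hkdef
        have hne : p.1 ≠ k := by
          rw [hkdef]
          intro he
          rw [List.getD_eq_getElem _ _ hlen] at he
          rw [← he] at hpi
          exact hp hpi
        have hb : (p.1 == k) = false := by simp [hne]
        show (PySem.Dict.mk (p::cs)).get? ((p.1 :: cs.map Prod.fst).getD (i+1) "") = pvFVal cs c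
        rw [List.getD_cons_succ, ← hkdef, pv_get?_mk]
        have hskip2 : List.find? (fun q => q.1 == k) (p::cs)
                    = List.find? (fun q => q.1 == k) cs := by
          rw [List.find?_cons]; simp [hb]
        rw [hskip2, ← pv_get?_mk]
        exact ih

-- unconditional insert fold: last write for each key, value a function of the key
theorem pv_get?_foldl_insert (l : List String) (g : String → Option String)
    (d : PySem.Dict String (Option String)) (k : String) :
    (l.foldl (fun d a => d.insert a (g a)) d).get? k
      = if k ∈ l then some (g k) else d.get? k := by
  induction l generalizing d with
  | nil => simp
  | cons a l ih =>
    simp only [List.foldl_cons, ih, List.mem_cons]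
    by_cases hk : k ∈ l
    · simp [hk]
    · by_cases hka : k = a
      · subst hka; simp [hk, PySem.Dict.get?_insert_self]
      · simp [hk, hka, PySem.Dict.get?_insert_of_ne _ _ hka]

-- conditional insert of one constant value over key/clean pairs
theorem pv_get?_foldl_condinsert (l : List (String × String)) (c : String → Bool) (v : Option String)
    (d : PySem.Dict String (Option String)) (k : String) :
    (l.foldl (fun d q => if c q.2 then d.insert q.1 (v) else d) d).get? k
      = if l.any (fun q => k == q.1 && c q.2) then some v else d.get? k := by
  induction l generalizing d with
  | nil => simp
  | cons q l ih =>
    simp only [List.foldl_cons, ih, List.any_cons]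
    by_cases hl : l.any (fun q => k == q.1 && c q.2)
    · simp [hl]
    · simp only [hl, Bool.or_false]
      by_cases hc : c q.2
      · by_cases hk : k = q.1
        · subst hk; simp [hc, PySem.Dict.get?_insert_self]
        · simp [hc, hk, PySem.Dict.get?_insert_of_ne _ _ hk]
      · simp [hc]

theorem pv_keys_foldl_condinsert (l : List (String × String)) (c : String → Bool) (v : Option String)
    (d : PySem.Dict String (Option String)) (h : ∀ q ∈ l, d.contains q.1 = true) :
    (l.foldl (fun d q => if c q.2 then d.insert q.1 (v) else d) d).keys = d.keys := by
  induction l generalizing d with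
  | nil => simp
  | cons q l ih =>
    simp only [List.foldl_cons]
    by_cases hc : c q.2
    · rw [if_pos hc, ih]
      · exact PySem.Dict.keys_insert_of_contains d v (h q (by simp))
      · intro q' hq'
        rw [PySem.Dict.contains_insert]
        simp [h q' (List.mem_cons_of_mem _ hq')]
    · rw [if_neg hc, ih]
      intro q' hq'; exact h q' (List.mem_cons_of_mem _ hq')

-- membership test hidden in B's inner loop over (answer, cleaned) pairs
theorem pv_any_key (l : List String) (k : String) (c : String → Bool) :
    l.any (fun a => k == a && c a) = (decide (k ∈ l) && c k) := by
  induction l with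
  | nil => simp
  | cons a l ih =>
    simp only [List.any_cons, ih, List.mem_cons]
    by_cases hka : k = a
    · subst hka
      cases c k <;> simp
    · simp [hka]

-- B's dict after the pattern sweep, foldr form: value at any key
theorem pvB_get?_foldr (answer_set : List String) (categories : List (String × String)) (k : String) :
    (categories.foldr (fun p d =>
        (answer_set.map (fun answer => (answer, pvClean answer))).foldl
          (fun d q => if PySem.Str.isIn p.1 q.2 then d.insert q.1 (some p.2) else d) d)
      (answer_set.foldl (fun d answer => d.insert answer none) PySem.Dict.empty)).get? k
    = if k ∈ answer_set then some (pvFVal categories (pvClean k)) else none := by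
  induction categories with
  | nil =>
    rw [List.foldr_nil, pv_get?_foldl_insert]
    by_cases hk : k ∈ answer_set <;> simp [hk, pvFVal]
  | cons p cs ih =>
    rw [List.foldr_cons, pv_get?_foldl_condinsert, ih]
    have hany : (answer_set.map (fun answer => (answer, pvClean answer))).any
        (fun q => k == q.1 && PySem.Str.isIn p.1 q.2)
        = (decide (k ∈ answer_set) && PySem.Str.isIn p.1 (pvClean k)) := by
      rw [List.any_map]
      have : ((fun q => k == q.1 && PySem.Str.isIn p.1 q.2) ∘ (fun answer => (answer, pvClean answer)))
           = (fun a => k == a && PySem.Str.isIn p.1 (pvClean a)) := rfl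
      rw [this, pv_any_key]
    rw [hany]
    generalize pvClean k = c
    by_cases hk : k ∈ answer_set
    · by_cases hc : PySem.Str.isIn p.1 c
      · have hcc : PySem.Chars.isIn p.1.toList c.toList = true := by
          simpa [PySem.Str.isIn] using hc
        have hhead : pvFVal (p::cs) c = some p.2 := by
          simp only [pvFVal]
          rw [List.find?_cons]
          simp [hcc]
        rw [hhead]
        simp [hk, hcc]
      · have hcb : PySem.Str.isIn p.1 c = false := by simpa using hc
        have hcc : PySem.Chars.isIn p.1.toList c.toList = false := by
          simpa [PySem.Str.isIn] using hcb
        have htail : pvFVal (p::cs) c = pvFVal cs c := by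
          simp only [pvFVal]
          rw [List.find?_cons]
          simp [hcc]
        rw [htail]
        simp [hk, hcc]
    · simp [hk]

theorem pvB_keys_foldr (answer_set : List String) (categories : List (String × String)) :
    (categories.foldr (fun p d =>
        (answer_set.map (fun answer => (answer, pvClean answer))).foldl
          (fun d q => if PySem.Str.isIn p.1 q.2 then d.insert q.1 (some p.2) else d) d)
      (answer_set.foldl (fun d answer => d.insert answer none) PySem.Dict.empty)).keys
    = (answer_set.foldl (fun d answer => d.insert answer (none : Option String)) PySem.Dict.empty).keys := by
  induction categories with
  | nil => rw [List.foldr_nil]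
  | cons p cs ih =>
    rw [List.foldr_cons, pv_keys_foldl_condinsert, ih]
    intro q hq
    obtain ⟨a, ha, rfl⟩ := List.mem_map.mp hq
    rw [PySem.Dict.contains_eq_isSome_get?, pvB_get?_foldr]
    simp [ha]

theorem pv_main (answer_set : List String) (categories : List (String × String)) :
    answer_to_category_dict answer_set categories = answer_to_category_dict_alt answer_set categories := by
  have hfun : (fun (d : PySem.Dict String (Option String)) (answer : String) =>
      d.insert answer
        (match (categories.map Prod.fst).findIdx? (fun v => PySem.Str.isIn v (pvClean answer)) with
         | none => (none : Option String)
         | some i => (PySem.Dict.mk categories).get? ((categories.map Prod.fst).getD i "")))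
      = fun d answer => d.insert answer (pvFVal categories (pvClean answer)) := by
    funext d answer
    rw [pvA_val]
  show (answer_set.foldl (fun d answer =>
      d.insert answer
        (match (categories.map Prod.fst).findIdx? (fun v => PySem.Str.isIn v (pvClean answer)) with
         | none => (none : Option String)
         | some i => (PySem.Dict.mk categories).get? ((categories.map Prod.fst).getD i ""))) PySem.Dict.empty).items
    = (categories.reverse.foldl (fun d p =>
        (answer_set.map (fun answer => (answer, pvClean answer))).foldl
          (fun d q => if PySem.Str.isIn p.1 q.2 then d.insert q.1 (some p.2) else d) d)
      (answer_set.foldl (fun d answer => d.insert answer none) PySem.Dict.empty)).items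
  rw [hfun, List.foldl_reverse]
  have hnodA : (answer_set.foldl (fun d a => d.insert a (pvFVal categories (pvClean a))) PySem.Dict.empty).keys.Nodup :=
    PySem.Dict.nodup_keys_foldl_insert _ _ _ (by rw [PySem.Dict.keys_empty]; exact List.nodup_nil)
  have hnodB : (categories.foldr (fun p d =>
        (answer_set.map (fun answer => (answer, pvClean answer))).foldl
          (fun d q => if PySem.Str.isIn p.1 q.2 then d.insert q.1 (some p.2) else d) d)
      (answer_set.foldl (fun d answer => d.insert answer none) PySem.Dict.empty)).keys.Nodup := by
    rw [pvB_keys_foldr]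
    exact PySem.Dict.nodup_keys_foldl_insert _ _ _ (by rw [PySem.Dict.keys_empty]; exact List.nodup_nil)
  rw [PySem.Dict.items_eq_map_keys _ hnodA none, PySem.Dict.items_eq_map_keys _ hnodB none]
  rw [pvB_keys_foldr]
  rw [PySem.Dict.keys_foldl_insert, PySem.Dict.keys_foldl_insert]
  apply List.map_congr_left
  intro k hk
  rw [pv_getD_eq, pv_getD_eq, pv_get?_foldl_insert, pvB_get?_foldr]
  rw [PySem.Dict.get?_empty]

-- ===== VERDICT (by name: the statement is the Claim_ definition above) =====
theorem answer_to_category_dict_spec : Claim_equal_answer_to_category_dict := by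
  intro answer_set categories _
  unfold Spec_answer_to_category_dict
  exact pv_main answer_set categories
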